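-- pv_equiv track=rewrite | github.com/DCA-28/UriCodes | Ad-Hoc/Python/URI-1533.py | findSuspect
-- ===== SOURCE A (Python) =====
-- def findSuspect(values): #values is a vector of integer numbers
--     vectorOriginal = values
--     vectorDictionary = []
--
--     for i in range(len(vectorOriginal)):
--         element = [ vectorOriginal[i],i ]
--         vectorDictionary.append(element)
--
--     vectorDictionary = dict(vectorDictionary) #to find the index in O(1)
--     vectorOriginal.sort()
--     suspect = vectorOriginal[-2]
--     return (vectorDictionary[suspect] + 1)
-- ===== SOURCE B (Python) =====
-- def findSuspect(values):
--     # One pass tracking the two largest values (with multiplicity), then the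
--     # last index of the runner-up. Unlike A, does not sort `values` in place.
--     m1 = m2 = None
--     for v in values:
--         if m1 is None or v > m1:
--             m1, m2 = v, m1
--         elif m2 is None or v > m2:
--             m2 = v
--     last = None
--     for i, v in enumerate(values):
--         if v == m2:
--             last = i
--     return last + 1
-- ===== Notes on version B (the rewrite author's own statement) =====
-- stated objective: faster
-- what changed: Replaces A's index-dict construction plus full in-place sort with a single pass tracking the two largest values followed by a scan for the last index of the runner-up.
import Mathlib
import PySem

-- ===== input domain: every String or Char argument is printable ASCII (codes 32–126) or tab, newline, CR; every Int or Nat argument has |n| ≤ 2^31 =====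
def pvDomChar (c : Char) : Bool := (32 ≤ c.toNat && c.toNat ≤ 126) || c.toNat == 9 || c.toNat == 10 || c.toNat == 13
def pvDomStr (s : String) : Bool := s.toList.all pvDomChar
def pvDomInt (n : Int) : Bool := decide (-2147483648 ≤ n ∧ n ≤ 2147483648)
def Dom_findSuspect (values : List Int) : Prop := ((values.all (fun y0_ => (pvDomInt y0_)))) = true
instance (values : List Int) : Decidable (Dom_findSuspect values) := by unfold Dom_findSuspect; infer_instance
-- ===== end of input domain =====

-- B replaces A's index-dict construction plus full sort with a single pass tracking the
-- two largest values and a scan for the last index of the runner-up (O(n) vs O(n log n)).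
-- Equivalence is about the RETURN value only: Python A sorts its argument in place, B does not.

-- ===== PORT A =====
def findSuspect (values : List Int) : Int :=
  -- for i in range(len(vectorOriginal)): vectorDictionary.append([vectorOriginal[i], i])
  let vectorDictionaryList : List (Int × Int) :=
    (PySem.List.pyRange 0 (PySem.List.len values) 1).foldl
      (fun acc i => acc ++ [((PySem.List.pyGet? values i).getD 0, i)]) []
      -- pyGet? is always `some` here (i ∈ range(len)); .getD 0 is unreachable padding
  let vectorDictionary := PySem.Dict.ofList vectorDictionaryList
  let sortedValues := PySem.List.sorted values (fun x => x) false   -- vectorOriginal.sort()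
  match PySem.List.pyGet? sortedValues (-2) with
  | none => 0                       -- IndexError (len < 2); excluded by Pre_findSuspect
  | some suspect => (vectorDictionary.get? suspect).getD 0 + 1
      -- KeyError impossible: suspect is an element of values, hence a dict key

-- ===== PORT B =====
def findSuspectStep (p : Option Int × Option Int) (v : Int) : Option Int × Option Int :=
  match p with
  | (none, _) => (some v, none)                 -- m1 is None: m1, m2 = v, m1
  | (some m1, m2) =>
    if m1 < v then (some v, some m1)            -- v > m1: m1, m2 = v, m1
    else match m2 with
      | none => (some m1, some v)               -- m2 is None: m2 = v
      | some b => if b < v then (some m1, some v) else (some m1, some b)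

def findSuspect_alt (values : List Int) : Int :=
  let p := values.foldl findSuspectStep (none, none)
  let last := (PySem.List.enumerate values).foldl
      (fun (acc : Option Int) q => if some q.2 = p.2 then some q.1 else acc) none
  match last with
  | none => 0                       -- TypeError None+1 (len < 2); excluded by Pre_findSuspect
  | some l => l + 1

-- ===== PRECONDITION & SPEC =====
-- Python A raises IndexError (vectorOriginal[-2]) on lists of fewer than two elements.
def Pre_findSuspect (values : List Int) : Prop := 2 ≤ values.length
instance (values : List Int) : Decidable (Pre_findSuspect values) := by unfold Pre_findSuspect; infer_instance
def pvWitness_findSuspect : List Int := [3, 1, 2]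

def Spec_findSuspect (values : List Int) (out : Int) : Prop := out = findSuspect_alt values
instance (values : List Int) (out : Int) : Decidable (Spec_findSuspect values out) := by unfold Spec_findSuspect; infer_instance

-- ===== CLAIM (what is proved, stated in full; the proofs are below) =====
def Claim_equal_findSuspect : Prop := ∀ (values : List Int), Dom_findSuspect values → Pre_findSuspect values → Spec_findSuspect values (findSuspect values)

-- ===== LEMMAS AND PROOFS =====

-- the last and second-to-last elements of a list, as B's loop state (m1, m2)
def pvLast2 (s : List Int) : Option Int × Option Int := (s.getLast?, s.dropLast.getLast?)

theorem pvLength_insertBy (before : Int → Int → Bool) (x : Int) (ys : List Int) :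
    (PySem.List.insertBy before x ys).length = ys.length + 1 := by
  induction ys with
  | nil => rfl
  | cons y ys ih => simp only [PySem.List.insertBy]; split <;> simp [ih]

theorem pvPairwise_insertBy (v : Int) (ys : List Int) (h : ys.Pairwise (· ≤ ·)) :
    (PySem.List.insertBy (fun a b => decide (a < b)) v ys).Pairwise (· ≤ ·) := by
  induction ys with
  | nil => simp [PySem.List.insertBy]
  | cons y ys ih =>
      rw [List.pairwise_cons] at h
      obtain ⟨hy, hys⟩ := h
      simp only [PySem.List.insertBy]
      split
      · rename_i hvy
        rw [decide_eq_true_eq] at hvy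
        refine List.Pairwise.cons ?_ (List.Pairwise.cons hy hys)
        intro b hb
        rcases List.mem_cons.mp hb with rfl | hb
        · exact le_of_lt hvy
        · exact le_trans (le_of_lt hvy) (hy b hb)
      · rename_i hvy
        rw [decide_eq_true_eq] at hvy
        refine List.Pairwise.cons ?_ (ih hys)
        intro b hb
        rcases (PySem.List.mem_insertBy _ _ _ _).mp hb with rfl | hb
        · omega
        · exact hy b hb

theorem pvLast2_cons (a : Int) (L : List Int) (h : 2 ≤ L.length) :
    pvLast2 (a :: L) = pvLast2 L := by
  match L, h with
  | b :: c :: t, _ =>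
      simp [pvLast2, List.dropLast_cons₂, List.getLast?_cons_cons]

theorem pvStep_insertBy (v : Int) (acc : List Int) (h : acc.Pairwise (· ≤ ·)) :
    pvLast2 (PySem.List.insertBy (fun a b => decide (a < b)) v acc) =
      findSuspectStep (pvLast2 acc) v := by
  induction acc with
  | nil => rfl
  | cons a acc' ih =>
      rw [List.pairwise_cons] at h
      obtain ⟨ha, h'⟩ := h
      cases acc' with
      | nil =>
          simp only [PySem.List.insertBy]
          by_cases hva : v < a
          · rw [if_pos (by simpa using hva)]
            simp [pvLast2, findSuspectStep, show ¬ a < v by omega]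
          · rw [if_neg (by simpa using hva)]
            by_cases h2 : a < v
            · simp [pvLast2, findSuspectStep, h2]
            · have : a = v := by omega
              subst this
              simp [pvLast2, findSuspectStep]
      | cons b t =>
          simp only [PySem.List.insertBy]
          by_cases hva : v < a
          · rw [if_pos (by simpa using hva)]
            rw [show (v :: a :: b :: t : List Int) = v :: (a :: b :: t) from rfl,
                pvLast2_cons v (a :: b :: t) (by simp)]
            have hall : ∀ x ∈ (a :: b :: t : List Int), v ≤ x := by
              intro x hx
              rcases List.mem_cons.mp hx with rfl | hx
              · exact le_of_lt hva
              · exact le_trans (le_of_lt hva) (ha x hx)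
            have hne : (a :: b :: t : List Int) ≠ [] := by simp
            have hdne : ((a :: b :: t : List Int)).dropLast ≠ [] := by
              simp [List.dropLast_cons₂]
            have h1 : pvLast2 (a :: b :: t) =
                (some ((a :: b :: t).getLast hne), some ((a :: b :: t).dropLast.getLast hdne)) := by
              simp [pvLast2, List.getLast?_eq_some_getLast]
            rw [h1]
            have hm1 : v ≤ (a :: b :: t).getLast hne := hall _ (List.getLast_mem hne)
            have hm2 : v ≤ (a :: b :: t).dropLast.getLast hdne :=
              hall _ ((List.dropLast_sublist _).subset (List.getLast_mem hdne))
            simp only [findSuspectStep]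
            rw [if_neg (by omega), if_neg (by omega)]
          · rw [if_neg (by simpa using hva)]
            have hlen : 2 ≤ (PySem.List.insertBy (fun a b => decide (a < b)) v (b :: t)).length := by
              rw [pvLength_insertBy]; simp
            rw [show (if decide (v < b) = true then v :: b :: t
                  else b :: PySem.List.insertBy (fun a b => decide (a < b)) v t)
                = PySem.List.insertBy (fun a b => decide (a < b)) v (b :: t) by
                  simp only [PySem.List.insertBy]]
            rw [pvLast2_cons _ _ hlen, ih h']
            cases t with
            | cons c t' =>
                rw [pvLast2_cons a (b :: c :: t') (by simp)]
            | nil =>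
                have hav : a ≤ v := by omega
                have hab : a ≤ b := ha b (by simp)
                by_cases hbv : b < v
                · simp [pvLast2, findSuspectStep, hbv]
                · by_cases hav' : a < v
                  · simp [pvLast2, findSuspectStep, hbv, hav']
                  · have : a = v := by omega
                    subst this
                    simp [pvLast2, findSuspectStep, hbv]

theorem pvFoldl_step (l acc : List Int) (h : acc.Pairwise (· ≤ ·)) :
    l.foldl findSuspectStep (pvLast2 acc) =
      pvLast2 (l.foldl (fun acc x => PySem.List.insertBy (fun a b => decide (a < b)) x acc) acc) := by
  induction l generalizing acc with
  | nil => rfl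
  | cons x l ih =>
      simp only [List.foldl_cons]
      rw [← pvStep_insertBy x acc h]
      exact ih _ (pvPairwise_insertBy x acc h)

theorem pvTop2 (values : List Int) :
    values.foldl findSuspectStep (none, none) =
      pvLast2 (PySem.List.sorted values (fun x => x) false) := by
  rw [PySem.List.sorted_eq_foldl_insertBy]
  exact pvFoldl_step values [] (by simp)

theorem pvGet?_foldl_insert (ps : List (Int × Int)) (d : PySem.Dict Int Int) (x : Int) :
    (ps.foldl (fun d p => d.insert p.1 p.2) d).get? x
      = ps.foldl (fun (acc : Option Int) p => if p.1 = x then some p.2 else acc) (d.get? x) := by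
  induction ps generalizing d with
  | nil => rfl
  | cons p ps ih =>
      simp only [List.foldl_cons, ih, PySem.Dict.get?_insert]
      congr 1
      by_cases hx : p.1 = x
      · rw [if_pos hx, if_pos hx.symm]
      · rw [if_neg hx, if_neg (fun h => hx h.symm)]

theorem pvFoldl_some (qs : List (Int × Int)) (x : Int) (a : Option Int) (ha : a ≠ none) :
    qs.foldl (fun (acc : Option Int) q => if q.2 = x then some q.1 else acc) a ≠ none := by
  induction qs generalizing a with
  | nil => exact ha
  | cons q qs ih =>
      simp only [List.foldl_cons]
      by_cases hq : q.2 = x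
      · exact ih _ (by simp [hq])
      · rw [if_neg hq]; exact ih _ ha

theorem pvFoldl_last_ne_none (qs : List (Int × Int)) (x : Int)
    (hex : ∃ q ∈ qs, q.2 = x) (a : Option Int) :
    qs.foldl (fun (acc : Option Int) q => if q.2 = x then some q.1 else acc) a ≠ none := by
  induction qs generalizing a with
  | nil => simp at hex
  | cons q qs ih =>
      obtain ⟨r, hr, hrx⟩ := hex
      simp only [List.foldl_cons]
      rcases List.mem_cons.mp hr with rfl | hmem
      · rw [if_pos hrx]; exact pvFoldl_some qs x _ (by simp)
      · by_cases hq : q.2 = x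
        · rw [if_pos hq]; exact pvFoldl_some qs x _ (by simp)
        · rw [if_neg hq]; exact ih ⟨r, hmem, hrx⟩ a

theorem findSuspect_spec_aux (values : List Int) (h : 2 ≤ values.length) :
    findSuspect values = findSuspect_alt values := by
  simp only [findSuspect, findSuspect_alt]
  set s := PySem.List.sorted values (fun x => x) false with hs
  have hslen : s.length = values.length := PySem.List.length_sorted values _ false
  have hidx : s.length - 2 < s.length := by omega
  have hget : PySem.List.pyGet? s (-2) = some s[s.length - 2] := by
    rw [PySem.List.pyGet?_neg_ofNat s 2 (by norm_num) (by omega)]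
    exact List.getElem?_eq_getElem hidx
  -- B's runner-up is the second-to-last element of the sorted list
  have hdne : s.dropLast ≠ [] := by
    have : s.dropLast.length = s.length - 1 := List.length_dropLast
    intro hnil; rw [hnil] at this; simp at this; omega
  have hm2 : (pvLast2 s).2 = some s[s.length - 2] := by
    show s.dropLast.getLast? = _
    rw [List.getLast?_eq_some_getLast hdne, List.getLast_eq_getElem hdne]
    congr 1
    have hlt : s.dropLast.length - 1 < s.dropLast.length := by
      rw [List.length_dropLast]; omega
    rw [List.getElem_dropLast hlt]
    congr 1
    rw [List.length_dropLast]
    omega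
  have htop : values.foldl findSuspectStep (none, none) = pvLast2 s := pvTop2 values
  -- A's pair list is the (value, index) view of enumerate(values)
  have hpairs : (PySem.List.pyRange 0 (PySem.List.len values) 1).foldl
      (fun acc i => acc ++ [((PySem.List.pyGet? values i).getD 0, i)]) ([] : List (Int × Int))
      = (PySem.List.enumerate values).map (fun q => (q.2, q.1)) := by
    rw [PySem.List.foldl_append_singleton_eq_map, PySem.List.enumerate_eq_map_pyRange values 0,
      List.map_map]
    simp only [List.nil_append]
    rfl
  rw [hget, htop, hm2, hpairs]
  set x := s[s.length - 2] with hx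
  -- A's dict lookup is the last-index fold
  have hA : (PySem.Dict.ofList ((PySem.List.enumerate values).map (fun q => (q.2, q.1)))).get? x
      = (PySem.List.enumerate values).foldl
          (fun (acc : Option Int) q => if q.2 = x then some q.1 else acc) none := by
    rw [show PySem.Dict.ofList ((PySem.List.enumerate values).map (fun q => (q.2, q.1)))
        = ((PySem.List.enumerate values).map (fun q => (q.2, q.1))).foldl
            (fun d p => d.insert p.1 p.2) PySem.Dict.empty from rfl]
    rw [pvGet?_foldl_insert, PySem.Dict.get?_empty, List.foldl_map]
  have hBcond : ((PySem.List.enumerate values).foldl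
      (fun (acc : Option Int) q => if some q.2 = some x then some q.1 else acc) none)
      = (PySem.List.enumerate values).foldl
          (fun (acc : Option Int) q => if q.2 = x then some q.1 else acc) none := by
    simp only [Option.some.injEq]
  show ((PySem.Dict.ofList ((PySem.List.enumerate values).map (fun q => (q.2, q.1)))).get? x).getD 0 + 1
      = (match (PySem.List.enumerate values).foldl
          (fun (acc : Option Int) q => if some q.2 = some x then some q.1 else acc) none with
        | none => 0
        | some l => l + 1)
  rw [hA, hBcond]
  -- the common fold is `some`, since x occurs in values
  have hxmem : x ∈ values := by
    rw [← PySem.List.mem_sorted values (fun x => x) false]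
    exact List.getElem_mem hidx
  have hex : ∃ q ∈ PySem.List.enumerate values, q.2 = x := by
    have := PySem.List.map_snd_enumerate values 0
    rw [← this] at hxmem
    obtain ⟨q, hq, hqx⟩ := List.mem_map.mp hxmem
    exact ⟨q, hq, hqx⟩
  obtain ⟨l, hl⟩ := Option.ne_none_iff_exists'.mp
    (pvFoldl_last_ne_none (PySem.List.enumerate values) x hex none)
  rw [hl]
  rfl

-- ===== VERDICT (by name: the statement is the Claim_ definition above) =====
theorem findSuspect_spec : Claim_equal_findSuspect := by
  intro values _ hpre
  exact findSuspect_spec_aux values hpre
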